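-- pv_equiv track=rewrite | github.com/MetOffice/CDDS | cdds/cdds/deprecated/transfer/sim_review.py | filter_critical_issues
-- ===== SOURCE A (Python) =====
-- def filter_critical_issues(issue_list: list[str]) -> set[list[str]]:
--     """Filters reported issues by removing the prefix from the string, to show only the actual error message, and
--     consolidate and sort error messages to remove repeats.
--
--     Parameters
--     ----------
--     issue_list: list[str]
--         A list of string from a critical error log.
--
--     Returns
--     -------
--     list[str]
--         A filtered list of critical error strings.
--     """
--     filtered_issues = []
--     for issue_str in issue_list:
--         try:
--             filtered_issues += [' '.join(issue_str.split(' ')[4:])]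
--         except IndexError:
--             filtered_issues += [issue_str]
--
--     return sorted(set(filtered_issues))
-- ===== SOURCE B (Python) =====
-- def filter_critical_issues(issue_list):
--     """Online algorithm: maintain `out` as a sorted, duplicate-free list at all
--     times, and insert each stripped message at its sorted position (skipping it
--     if already present).  No set and no sort call are ever made."""
--     out = []
--     for issue_str in issue_list:
--         msg = ' '.join(issue_str.split(' ')[4:])
--         i = 0
--         while i < len(out) and out[i] < msg:
--             i += 1
--         if i == len(out) or out[i] != msg:
--             out.insert(i, msg)
--     return out
-- ===== Notes on version B (the rewrite author's own statement) =====
-- stated objective: alternative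
-- what changed: Instead of collecting all stripped messages and then calling sorted(set(...)), B is an online algorithm: it maintains the result as a sorted duplicate-free list throughout and inserts each stripped message at its sorted position (skipping duplicates), so no hash set and no sort call exist.
import Mathlib
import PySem

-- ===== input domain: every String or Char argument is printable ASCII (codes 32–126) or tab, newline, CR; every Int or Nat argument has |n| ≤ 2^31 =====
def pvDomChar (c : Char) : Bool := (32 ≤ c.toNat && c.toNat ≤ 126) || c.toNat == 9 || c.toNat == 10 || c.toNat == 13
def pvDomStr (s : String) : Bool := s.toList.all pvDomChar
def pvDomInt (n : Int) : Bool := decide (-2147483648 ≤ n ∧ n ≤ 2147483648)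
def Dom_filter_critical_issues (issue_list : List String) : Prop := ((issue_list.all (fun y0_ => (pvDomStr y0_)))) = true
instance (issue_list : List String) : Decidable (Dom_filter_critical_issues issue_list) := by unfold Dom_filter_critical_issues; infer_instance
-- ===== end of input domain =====

-- ===== PORT A =====
-- B replaces the batch sorted(set(map(...))) with an online sorted-insert that keeps the result sorted and duplicate-free throughout (objective: alternative; same return value).
-- shared mapping helper: ' '.join(issue_str.split(' ')[4:])  (both Pythons contain this exact expression)
def pvStrip (issue_str : String) : String :=
  PySem.Str.join " " (PySem.List.slice ((PySem.Str.split? issue_str " ").getD []) (some 4) none)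

def filter_critical_issues (issue_list : List String) : List String :=
  -- filtered_issues = []; for issue_str in issue_list: filtered_issues += [' '.join(issue_str.split(' ')[4:])]
  -- (split(' ')[4:] never raises IndexError, so the 'except' branch is dead)
  let filtered_issues := issue_list.foldl (fun acc issue_str => acc ++ [pvStrip issue_str]) []
  -- return sorted(set(filtered_issues))
  PySem.List.sorted (PySem.Set.ofList filtered_issues) (fun x => x)

-- ===== PORT B =====
-- i = 0; while i < len(out) and out[i] < msg: i += 1   — linear scan for the insertion point
def pvScan (msg : String) : List String → Nat
  | [] => 0
  | x :: xs => if x < msg then pvScan msg xs + 1 else 0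

def filter_critical_issues_alt (issue_list : List String) : List String :=
  -- out = []; for issue_str in issue_list: msg = ...; scan; if i == len(out) or out[i] != msg: out.insert(i, msg)
  issue_list.foldl
    (fun out issue_str =>
      let msg := pvStrip issue_str
      let i := pvScan msg out
      if i = out.length ∨ PySem.List.pyGet? out (i : Int) ≠ some msg
      then PySem.List.insert out (i : Int) msg else out) []

-- ===== PRECONDITION & SPEC =====
def Spec_filter_critical_issues (issue_list : List String) (out : List String) : Prop := out = filter_critical_issues_alt issue_list
instance (issue_list : List String) (out : List String) : Decidable (Spec_filter_critical_issues issue_list out) := by unfold Spec_filter_critical_issues; infer_instance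

-- ===== CLAIM (what is proved, stated in full; the proofs are below) =====
def Claim_equal_filter_critical_issues : Prop := ∀ (issue_list : List String), Dom_filter_critical_issues issue_list → Spec_filter_critical_issues issue_list (filter_critical_issues issue_list)

-- ===== LEMMAS AND PROOFS =====

-- structural-recursion view of one loop body of B (scan + conditional insert)
def pvInsU (msg : String) : List String → List String
  | [] => [msg]
  | x :: xs => if x < msg then x :: pvInsU msg xs else if x = msg then x :: xs else msg :: x :: xs

theorem pvInsert_natCast (xs : List String) (n : Nat) (v : String) :
    PySem.List.insert xs (n : Int) v = xs.take n ++ v :: xs.drop n := by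
  simp only [PySem.List.insert, PySem.List.sliceIndices]
  rw [if_neg (by omega : ¬ ((n : Int) < 0))]
  rw [show (if (1:Int) < 0 then (xs.length:Int) - 1 else (xs.length:Int)) = (xs.length:Int) by norm_num]
  rcases le_or_gt n xs.length with h | h
  · rw [show (min (n : Int) (xs.length : Int)).toNat = n by omega]
  · rw [show (min (n : Int) (xs.length : Int)).toNat = xs.length by omega]
    rw [List.take_length, List.drop_length,
        List.take_of_length_le (le_of_lt h), List.drop_eq_nil_of_le (le_of_lt h)]

-- one loop body of B equals the structural insertion
theorem pvStep_eq (msg : String) : ∀ out : List String,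
    (if pvScan msg out = out.length ∨ PySem.List.pyGet? out ((pvScan msg out : Nat) : Int) ≠ some msg
     then PySem.List.insert out ((pvScan msg out : Nat) : Int) msg else out) = pvInsU msg out := by
  intro out
  induction out with
  | nil =>
    simp only [pvScan, pvInsU, List.length_nil, Nat.cast_zero]
    rfl
  | cons x xs ih =>
    by_cases hlt : x < msg
    · have hscan : pvScan msg (x :: xs) = pvScan msg xs + 1 := by simp [pvScan, hlt]
      have hget : PySem.List.pyGet? (x :: xs) ((pvScan msg xs + 1 : Nat) : Int)
          = PySem.List.pyGet? xs ((pvScan msg xs : Nat) : Int) := by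
        simp [PySem.List.pyGet?_natCast]
      have hins : PySem.List.insert (x :: xs) ((pvScan msg xs + 1 : Nat) : Int) msg
          = x :: PySem.List.insert xs ((pvScan msg xs : Nat) : Int) msg := by
        rw [pvInsert_natCast, pvInsert_natCast]; simp
      rw [hscan]
      simp only [pvInsU, if_pos hlt, ← ih, hget, hins, List.length_cons]
      by_cases hc : pvScan msg xs = xs.length ∨ PySem.List.pyGet? xs ((pvScan msg xs : Nat) : Int) ≠ some msg
      · rw [if_pos hc, if_pos]
        rcases hc with h | h
        · exact Or.inl (by omega)
        · exact Or.inr h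
      · rw [if_neg hc, if_neg]
        push Not at hc ⊢
        refine ⟨by omega, hc.2⟩
    · have hscan : pvScan msg (x :: xs) = 0 := by simp [pvScan, hlt]
      rw [hscan]
      simp only [Nat.cast_zero, PySem.List.pyGet?_zero_cons, pvInsU, if_neg hlt]
      by_cases hx : x = msg
      · rw [if_pos hx, if_neg]
        push Not
        exact ⟨by simp, by simp [hx]⟩
      · rw [if_neg hx, if_pos (Or.inr (by simp [Ne.symm, hx]))]
        rw [show (0 : Int) = ((0 : Nat) : Int) by simp, pvInsert_natCast]
        simp
    
-- pvInsU keeps the list strictly sorted and adds msg to its members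
theorem pvInsU_sorted (msg : String) : ∀ out : List String, out.Pairwise (· < ·) →
    (pvInsU msg out).Pairwise (· < ·) ∧ ∀ y, (y ∈ pvInsU msg out ↔ y = msg ∨ y ∈ out) := by
  intro out
  induction out with
  | nil => intro _; simp [pvInsU]
  | cons x xs ih =>
    intro hp
    obtain ⟨hx, hxs⟩ := List.pairwise_cons.mp hp
    by_cases hlt : x < msg
    · obtain ⟨h1, h2⟩ := ih hxs
      refine ⟨?_, ?_⟩
      · simp only [pvInsU, if_pos hlt]
        rw [List.pairwise_cons]
        refine ⟨fun y hy => ?_, h1⟩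
        rcases (h2 y).mp hy with rfl | hy
        · exact hlt
        · exact hx y hy
      · intro y
        simp only [pvInsU, if_pos hlt, List.mem_cons, h2 y]
        tauto
    · by_cases hx' : x = msg
      · subst hx'
        refine ⟨?_, ?_⟩
        · simpa [pvInsU, hlt] using hp
        · intro y; simp [pvInsU, List.mem_cons]
      · have hmx : msg < x := lt_of_le_of_ne (not_lt.mp hlt) (Ne.symm hx')
        refine ⟨?_, ?_⟩
        · simp only [pvInsU, if_neg hlt, if_neg hx']
          rw [List.pairwise_cons]
          refine ⟨fun y hy => ?_, hp⟩
          rcases List.mem_cons.mp hy with rfl | hy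
          · exact hmx
          · exact lt_trans hmx (hx y hy)
        · intro y; simp only [pvInsU, if_neg hlt, if_neg hx', List.mem_cons]
    
-- fold invariant for B's loop
theorem pvFold_inv (l : List String) : ∀ acc : List String, acc.Pairwise (· < ·) →
    ((l.foldl (fun out s => pvInsU (pvStrip s) out) acc).Pairwise (· < ·) ∧
     ∀ y, (y ∈ l.foldl (fun out s => pvInsU (pvStrip s) out) acc ↔ y ∈ acc ∨ y ∈ l.map pvStrip)) := by
  induction l with
  | nil => intro acc h; simpa using h
  | cons s t ih =>
    intro acc h
    obtain ⟨h1, h2⟩ := pvInsU_sorted (pvStrip s) acc h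
    obtain ⟨g1, g2⟩ := ih (pvInsU (pvStrip s) acc) h1
    simp only [List.foldl_cons]
    refine ⟨g1, fun y => ?_⟩
    rw [g2 y, h2 y]
    simp only [List.map_cons, List.mem_cons]
    tauto

-- ===== VERDICT (by name: the statement is the Claim_ definition above) =====
theorem filter_critical_issues_spec : Claim_equal_filter_critical_issues := by
  intro issue_list _
  unfold Spec_filter_critical_issues filter_critical_issues filter_critical_issues_alt
  rw [PySem.List.foldl_append_singleton_eq_map]
  simp only [List.nil_append]
  have hbody : (fun (out : List String) (issue_str : String) =>
      let msg := pvStrip issue_str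
      let i := pvScan msg out
      if i = out.length ∨ PySem.List.pyGet? out (i : Int) ≠ some msg
      then PySem.List.insert out (i : Int) msg else out)
      = fun out s => pvInsU (pvStrip s) out := by
    funext out s
    exact pvStep_eq (pvStrip s) out
  rw [hbody]
  obtain ⟨hlt, hmem⟩ := pvFold_inv issue_list [] (by simp)
  refine PySem.List.sorted_eq_of_perm_of_pairwise_lt _ _ (fun x => x) ?_ hlt
  rw [List.perm_ext_iff_of_nodup (hlt.imp ne_of_lt) (PySem.Set.nodup_ofList _)]
  intro a
  rw [hmem a, PySem.Set.mem_ofList]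
  simp
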